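-- pv_equiv track=rewrite | github.com/miau-murk/brsccp_replacement | monatomic_replacement/pdb_to_mol.py | process_pdb_lines
-- ===== SOURCE A (Python) =====
-- def is_hydrogen(atom_name):
--     # Hydrogens in PDB files start with 'H' or digit for hydrogen naming convention (e.g., "1HD1").
--     return atom_name.strip()[0] == 'H'
--
-- def process_pdb_lines(pdb_lines):
--     heavy_atoms = []
--     hydrogens = []
--
--     # Process all HETATM lines
--     for line in pdb_lines:
--         # Check if the line starts with HETATM
--         if line.startswith("HETATM"):
--             atom_name = line[12:16]  # The atom name is columns 13-16 in the PDB file format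
--             if is_hydrogen(atom_name):
--                 hydrogens.append(line)
--             else:
--                 heavy_atoms.append(line)
--
--     # Combine heavy atoms and hydrogens
--     ordered_lines = heavy_atoms + hydrogens
--     return ordered_lines
-- ===== SOURCE B (Python) =====
-- def is_hydrogen(atom_name):
--     # Hydrogens in PDB files start with 'H' or digit for hydrogen naming convention (e.g., "1HD1").
--     return atom_name.strip()[0] == 'H'
--
-- def process_pdb_lines(pdb_lines):
--     # Filter once, then let Python's stable sort put heavy atoms (key False)
--     # before hydrogens (key True), preserving each group's original order.
--     het = [line for line in pdb_lines if line.startswith("HETATM")]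
--     return sorted(het, key=lambda line: is_hydrogen(line[12:16]))
-- ===== Notes on version B (the rewrite author's own statement) =====
-- stated objective: idiomatic
-- what changed: Replaces the two-accumulator partition loop by a filter followed by a stable sort on the boolean is_hydrogen key; stability makes heavy atoms precede hydrogens with each group's order preserved.
import Mathlib
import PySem

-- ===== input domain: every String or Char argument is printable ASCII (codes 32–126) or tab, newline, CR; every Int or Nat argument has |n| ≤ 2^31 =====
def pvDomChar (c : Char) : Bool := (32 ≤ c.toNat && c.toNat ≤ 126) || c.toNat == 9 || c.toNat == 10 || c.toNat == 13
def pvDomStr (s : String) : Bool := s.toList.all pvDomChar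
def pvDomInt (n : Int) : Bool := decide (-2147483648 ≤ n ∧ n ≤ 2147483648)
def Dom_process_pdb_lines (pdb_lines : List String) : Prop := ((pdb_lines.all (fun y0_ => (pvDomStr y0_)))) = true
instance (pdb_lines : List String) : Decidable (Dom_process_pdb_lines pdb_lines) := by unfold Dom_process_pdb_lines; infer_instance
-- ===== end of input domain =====

-- B replaces A's two-accumulator partition loop by filter-then-stable-sort on the boolean hydrogen key (idiomatic; same results, not faster).


-- ===== PORT A =====
-- is_hydrogen: atom_name.strip()[0] == 'H'; none = the IndexError on an empty stripped name (excluded by Pre_).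
def is_hydrogen (atom_name : String) : Option Bool :=
  (PySem.Str.pyGet? (PySem.Str.strip atom_name) 0).map (fun c => c == 'H')

def process_pdb_lines (pdb_lines : List String) : List String :=
  let p := pdb_lines.foldl (fun (acc : List String × List String) line =>
    if PySem.Str.startswith line "HETATM" then
      match is_hydrogen (PySem.Str.slice line (some 12) (some 16)) with
      | some true => (acc.1, acc.2 ++ [line])       -- hydrogens.append(line)
      | _ => (acc.1 ++ [line], acc.2)               -- heavy_atoms.append(line)
    else acc) ([], [])
  p.1 ++ p.2                                        -- heavy_atoms + hydrogens

-- ===== PORT B =====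
def process_pdb_lines_alt (pdb_lines : List String) : List String :=
  let het := pdb_lines.filter (fun line => PySem.Str.startswith line "HETATM")
  PySem.List.sorted het
    (fun line => (is_hydrogen (PySem.Str.slice line (some 12) (some 16))).getD false) false

-- ===== PRECONDITION & SPEC =====
-- Pre_ excludes exactly the inputs on which the Python raises IndexError: a HETATM line whose
-- atom-name field (columns 13-16) strips to the empty string.
def Pre_process_pdb_lines (pdb_lines : List String) : Prop :=
  ∀ line ∈ pdb_lines, PySem.Str.startswith line "HETATM" = true →
    PySem.Str.strip (PySem.Str.slice line (some 12) (some 16)) ≠ ""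
instance (pdb_lines : List String) : Decidable (Pre_process_pdb_lines pdb_lines) := by
  unfold Pre_process_pdb_lines; infer_instance

def pvWitness_process_pdb_lines : List String :=
  ["HETATM      C   ", "HETATM      H   ", "ATOM  junk"]

def Spec_process_pdb_lines (pdb_lines : List String) (out : List String) : Prop := out = process_pdb_lines_alt pdb_lines
instance (pdb_lines : List String) (out : List String) : Decidable (Spec_process_pdb_lines pdb_lines out) := by unfold Spec_process_pdb_lines; infer_instance

-- ===== CLAIM (what is proved, stated in full; the proofs are below) =====
def Claim_equal_process_pdb_lines : Prop := ∀ (pdb_lines : List String), Dom_process_pdb_lines pdb_lines → Pre_process_pdb_lines pdb_lines → Spec_process_pdb_lines pdb_lines (process_pdb_lines pdb_lines)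

-- ===== LEMMAS AND PROOFS =====

-- the boolean sort key of port B
def pvKey (line : String) : Bool :=
  (is_hydrogen (PySem.Str.slice line (some 12) (some 16))).getD false

-- insertBy passes over a prefix it never inserts before
lemma insertBy_append_not_before {α : Type} (before : α → α → Bool) (x : α)
    (f t : List α) (hf : ∀ y ∈ f, before x y = false) :
    PySem.List.insertBy before x (f ++ t) = f ++ PySem.List.insertBy before x t := by
  induction f with
  | nil => simp
  | cons y ys ih =>
      have hy : before x y = false := hf y (by simp)
      simp only [List.cons_append, PySem.List.insertBy, hy]
      simp only [Bool.false_eq_true, if_false]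
      rw [ih (fun z hz => hf z (by simp [hz]))]

-- stable insertion sort on a boolean key is the partition: false-keys first, true-keys after
lemma foldl_insertBy_bool (key : α → Bool) (xs f t : List α)
    (hf : ∀ y ∈ f, key y = false) (ht : ∀ y ∈ t, key y = true) :
    xs.foldl (fun acc x => PySem.List.insertBy (fun a b => decide (key a < key b)) x acc) (f ++ t)
      = (f ++ xs.filter (fun x => !key x)) ++ (t ++ xs.filter key) := by
  induction xs generalizing f t with
  | nil => simp
  | cons x xs ih =>
      simp only [List.foldl_cons]
      cases hkx : key x with
      | true =>
          rw [PySem.List.insertBy_of_forall_not_before _ _ _ (by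
            intro y hy
            rcases List.mem_append.mp hy with h | h
            · simp [hkx, hf y h]
            · simp [hkx, ht y h])]
          rw [List.append_assoc]
          rw [ih f (t ++ [x]) hf (by intro y hy; rcases List.mem_append.mp hy with h | h
                                     · exact ht y h
                                     · simp at h; simpa [h] using hkx)]
          simp [hkx, List.append_assoc]
      | false =>
          rw [insertBy_append_not_before _ _ f t (by intro y hy; simp [hkx, hf y hy])]
          have hins : PySem.List.insertBy (fun a b => decide (key a < key b)) x t = x :: t := by
            cases t with
            | nil => simp [PySem.List.insertBy]
            | cons z zs =>
                have hz : key z = true := ht z (by simp)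
                simp [PySem.List.insertBy, hkx, hz]
          rw [hins]
          have : f ++ x :: t = (f ++ [x]) ++ t := by simp
          rw [this, ih (f ++ [x]) t (by intro y hy; rcases List.mem_append.mp hy with h | h
                                        · exact hf y h
                                        · simp at h; simpa [h] using hkx) ht]
          simp [hkx, List.append_assoc]

lemma sorted_bool_eq_partition (key : α → Bool) (xs : List α) :
    PySem.List.sorted xs key false
      = xs.filter (fun x => !key x) ++ xs.filter key := by
  rw [PySem.List.sorted_eq_foldl_insertBy]
  simpa using foldl_insertBy_bool key xs [] []
    (by intro y hy; simp at hy) (by intro y hy; simp at hy)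

-- A's two-accumulator loop computes the two filters
set_option maxHeartbeats 1000000 in
lemma processA_foldl (xs : List String) (h t : List String) :
    xs.foldl (fun (acc : List String × List String) line =>
      if PySem.Str.startswith line "HETATM" then
        match is_hydrogen (PySem.Str.slice line (some 12) (some 16)) with
        | some true => (acc.1, acc.2 ++ [line])
        | _ => (acc.1 ++ [line], acc.2)
      else acc) (h, t)
      = (h ++ xs.filter (fun l => PySem.Str.startswith l "HETATM" && !pvKey l),
         t ++ xs.filter (fun l => PySem.Str.startswith l "HETATM" && pvKey l)) := by
  induction xs generalizing h t with
  | nil => simp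
  | cons x xs ih =>
      rw [List.foldl_cons, List.filter_cons, List.filter_cons]
      by_cases hs : PySem.Str.startswith x "HETATM" = true
      · rcases hk : is_hydrogen (PySem.Str.slice x (some 12) (some 16)) with _ | b
        · have hky : pvKey x = false := by simp [pvKey, hk]
          simp only [hs, hky, Bool.not_false, Bool.and_false, if_true,
            Bool.false_eq_true, if_false, Bool.and_self]
          rw [ih (h ++ [x]) t]
          simp [List.append_assoc]
        · cases b
          · have hky : pvKey x = false := by simp [pvKey, hk]
            simp only [hs, hky, Bool.not_false, Bool.and_false, if_true,
              Bool.false_eq_true, if_false, Bool.and_self]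
            rw [ih (h ++ [x]) t]
            simp [List.append_assoc]
          · have hky : pvKey x = true := by simp [pvKey, hk]
            simp only [hs, hky, Bool.not_true, Bool.and_false, if_true,
              Bool.false_eq_true, if_false, Bool.and_self]
            rw [ih h (t ++ [x])]
            simp [List.append_assoc]
      · have hs' : PySem.Str.startswith x "HETATM" = false := by
          simpa using hs
        have hs2 : PySem.Chars.startswith x.toList ['H','E','T','A','T','M'] = false := by
          simpa using hs'
        rw [if_neg (by simp [hs2]), if_neg (by simp [hs2]), if_neg (by simp [hs2])]
        exact ih h t

lemma filter_filter_key (xs : List String) (q : String → Bool) :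
    (xs.filter (fun l => PySem.Str.startswith l "HETATM")).filter q
      = xs.filter (fun l => PySem.Str.startswith l "HETATM" && q l) := by
  rw [List.filter_filter]
  exact List.filter_congr (by intro x _; exact Bool.and_comm _ _)

-- ===== VERDICT (by name: the statement is the Claim_ definition above) =====
theorem process_pdb_lines_spec : Claim_equal_process_pdb_lines := by
  intro pdb_lines _ _
  show process_pdb_lines pdb_lines = process_pdb_lines_alt pdb_lines
  simp only [process_pdb_lines, process_pdb_lines_alt]
  rw [processA_foldl pdb_lines [] [], sorted_bool_eq_partition]
  simp only [List.nil_append, filter_filter_key]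
  rfl
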